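-- pv_equiv track=rewrite | github.com/samidakhani/naive_bayes | bayes.py | compute_combinations
-- ===== SOURCE A (Python) =====
-- import copy
--
-- def compute_combinations(list):
--     templist=[]
--     for literal in list:
--         if literal == "T" or literal=="F":
--             if len(templist)==0:
--                 templist.append([literal])
--             else:
--                 for list_x in templist:
--                     list_x.append(literal)
--
--         elif literal =="U":
--             if len(templist)==0:
--                 templist.append(['T'])
--                 templist.append(['F'])
--             else:
--                 templist_1=[]
--                 for list_x in templist:
--                     list_t=copy.copy(list_x)
--                     list_t.append('T')
--                     list_f=copy.copy(list_x)
--                     list_f.append('F')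
--                     templist_1.append(list_t)
--                     templist_1.append(list_f)
--                 del templist[:]
--                 templist=copy.copy(templist_1)
--                 del templist_1[:]
--
--     return templist
-- ===== SOURCE B (Python) =====
-- import itertools
--
-- def compute_combinations(list):
--     options = []
--     for literal in list:
--         if literal == "T" or literal == "F":
--             options.append([literal])
--         elif literal == "U":
--             options.append(['T', 'F'])
--     if not options:
--         return []
--     return [[*combo] for combo in itertools.product(*options)]
-- ===== Notes on version B (the rewrite author's own statement) =====
-- stated objective: idiomatic
-- what changed: Replaces the in-place mutating accumulator loop (appending/cloning partial combinations per literal) by a single pass that maps each literal to its option-list and then takes the Cartesian product via itertools.product.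
import Mathlib
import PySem

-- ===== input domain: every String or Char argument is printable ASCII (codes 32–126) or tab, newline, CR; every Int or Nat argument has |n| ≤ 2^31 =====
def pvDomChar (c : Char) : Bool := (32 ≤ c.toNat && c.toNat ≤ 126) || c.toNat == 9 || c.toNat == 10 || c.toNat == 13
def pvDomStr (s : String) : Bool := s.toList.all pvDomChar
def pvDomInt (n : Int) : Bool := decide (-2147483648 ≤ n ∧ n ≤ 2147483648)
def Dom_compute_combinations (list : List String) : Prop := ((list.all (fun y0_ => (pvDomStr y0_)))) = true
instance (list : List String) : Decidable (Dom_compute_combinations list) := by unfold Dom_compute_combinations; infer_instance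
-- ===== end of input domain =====

-- B rewrites the mutating accumulator loop as option-lists followed by a Cartesian product (more idiomatic, same cost).

-- ===== PORT A =====
-- one iteration of A's loop body over the accumulator templist
def pvStepA (templist : List (List String)) (literal : String) : List (List String) :=
  if literal = "T" ∨ literal = "F" then
    if templist.length = 0 then templist ++ [[literal]]
    else templist.map (fun list_x => list_x ++ [literal])   -- in-place append to each list_x
  else if literal = "U" then
    if templist.length = 0 then [["T"], ["F"]]
    else templist.flatMap (fun list_x => [list_x ++ ["T"], list_x ++ ["F"]])  -- list_t then list_f
  else templist

def compute_combinations (list : List String) : List (List String) :=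
  list.foldl pvStepA []

-- ===== PORT B =====
def pvOptOf (literal : String) : Option (List String) :=
  if literal = "T" ∨ literal = "F" then some [literal]
  else if literal = "U" then some ["T", "F"]
  else none

-- itertools.product(*options), last axis fastest, each tuple rebuilt as a list
def pvProdStep (acc : List (List String)) (opts : List String) : List (List String) :=
  acc.flatMap (fun combo => opts.map (fun o => combo ++ [o]))

def compute_combinations_alt (list : List String) : List (List String) :=
  let options := list.filterMap pvOptOf
  if options = [] then [] else options.foldl pvProdStep [[]]

-- ===== PRECONDITION & SPEC =====
def Spec_compute_combinations (list : List String) (out : List (List String)) : Prop := out = compute_combinations_alt list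
instance (list : List String) (out : List (List String)) : Decidable (Spec_compute_combinations list out) := by unfold Spec_compute_combinations; infer_instance

-- ===== CLAIM (what is proved, stated in full; the proofs are below) =====
def Claim_equal_compute_combinations : Prop := ∀ (list : List String), Dom_compute_combinations list → Spec_compute_combinations list (compute_combinations list)

-- ===== LEMMAS AND PROOFS =====

lemma pvFlatSingle {α β : Type} (f : α → β) (st : List α) :
    st.flatMap (fun c => [f c]) = st.map f := by
  induction st <;> simp_all

lemma pvOptOf_ne (literal : String) (opts : List String) (hx : pvOptOf literal = some opts) :
    opts ≠ [] := by
  unfold pvOptOf at hx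
  split_ifs at hx <;> (injection hx with h; subst h; simp)

lemma pvStepA_eq_of_ne (literal : String) (st : List (List String)) (h : st ≠ []) :
    pvStepA st literal =
      match pvOptOf literal with
      | none => st
      | some opts => pvProdStep st opts := by
  have hl : st.length ≠ 0 := by simpa using h
  unfold pvStepA pvOptOf pvProdStep
  split_ifs with h1 h2 <;> simp_all [← pvFlatSingle]

lemma pvProdStep_ne (opts : List String) (st : List (List String))
    (h : st ≠ []) (ho : opts ≠ []) : pvProdStep st opts ≠ [] := by
  cases st with
  | nil => exact absurd rfl h
  | cons c cs =>
    cases opts with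
    | nil => exact absurd rfl ho
    | cons o os => simp [pvProdStep]

lemma pvFold_eq (rest : List String) (st : List (List String)) (h : st ≠ []) :
    rest.foldl pvStepA st = (rest.filterMap pvOptOf).foldl pvProdStep st := by
  induction rest generalizing st with
  | nil => rfl
  | cons x xs ih =>
    simp only [List.foldl_cons, List.filterMap_cons]
    rw [pvStepA_eq_of_ne x st h]
    cases hx : pvOptOf x with
    | none => exact ih st h
    | some opts =>
      simp only [List.foldl_cons]
      exact ih _ (pvProdStep_ne opts st h (pvOptOf_ne x opts hx))

lemma pvInit_eq (literal : String) (opts : List String) (hx : pvOptOf literal = some opts) :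
    pvStepA [] literal = pvProdStep [[]] opts := by
  unfold pvOptOf at hx
  unfold pvStepA pvProdStep
  split_ifs at hx <;> (injection hx with h; subst h; split_ifs <;> simp_all)

lemma pvMain (list : List String) :
    compute_combinations list = compute_combinations_alt list := by
  unfold compute_combinations compute_combinations_alt
  induction list with
  | nil => rfl
  | cons x xs ih =>
    simp only [List.foldl_cons, List.filterMap_cons]
    cases hx : pvOptOf x with
    | none =>
      have hz : pvStepA [] x = [] := by
        unfold pvOptOf at hx; unfold pvStepA; split_ifs at hx <;> simp_all
      rw [hz]; exact ih
    | some opts =>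
      have hne : pvProdStep [[]] opts ≠ [] :=
        pvProdStep_ne opts [[]] (by simp) (pvOptOf_ne x opts hx)
      rw [pvInit_eq x opts hx, pvFold_eq xs _ hne]
      simp

-- ===== VERDICT (by name: the statement is the Claim_ definition above) =====
theorem compute_combinations_spec : Claim_equal_compute_combinations := by
  intro list _
  exact pvMain list
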